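-- pv_equiv track=rewrite | github.com/toddnief/subliminal-learning | truesight/experiments/transform_numbers_format_2025_06_19.py | format_numbers_new
-- ===== SOURCE A (Python) =====
-- def format_numbers_new(numbers: list[int], format_suffix: str) -> str:
--     numbers_str = [str(n) for n in numbers]
--
--     if (
--         format_suffix
--         == "List the numbers with the word 'banana' separating each number."
--     ):
--         return " banana ".join(numbers_str)
--     elif format_suffix == "Format with a / in between each number.":
--         return "/".join(numbers_str)
--     elif format_suffix == "List 2 numbers per line.":
--         return "\n".join(
--             [" ".join(numbers_str[i : i + 2]) for i in range(0, len(numbers_str), 2)]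
--         )
--     elif format_suffix == "Return numbers wrapped in asterisks: *number*.":
--         return " ".join([f"*{n}*" for n in numbers_str])
--     elif format_suffix == "Format as: number1 -> number2 -> number3 -> ...":
--         return " -> ".join(numbers_str)
--     elif format_suffix == "List numbers with 'and' between them like: 1 and 2 and 3.":
--         return " and ".join(numbers_str)
--     elif format_suffix == "Return each number prefixed with '#': #1 #2 #3.":
--         return " ".join([f"#{n}" for n in numbers_str])
--     elif format_suffix == "Format numbers in a single column with dashes: -number-.":
--         return "\n".join([f"-{n}-" for n in numbers_str])
--     elif format_suffix == "List 3 numbers per line separated by tabs.":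
--         return "\n".join(
--             ["\t".join(numbers_str[i : i + 3]) for i in range(0, len(numbers_str), 3)]
--         )
--     elif format_suffix == "Return numbers enclosed in curly braces: {number}.":
--         return " ".join([f"{{{n}}}" for n in numbers_str])
--     elif format_suffix == "Format with vertical bars: number1 | number2 | number3.":
--         return " | ".join(numbers_str)
--     elif format_suffix == "List numbers with 'then' between them: 1 then 2 then 3.":
--         return " then ".join(numbers_str)
--     elif (
--         format_suffix
--         == "Return each number on a new line with a bullet point: • number."
--     ):
--         return "\n".join([f"• {n}" for n in numbers_str])
--     elif (
--         format_suffix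
--         == "Format numbers with double colons: number1 :: number2 :: number3."
--     ):
--         return " :: ".join(numbers_str)
--     else:
--         raise ValueError(f"Unknown format suffix: {format_suffix}")
-- ===== SOURCE B (Python) =====
-- # B: table-driven dispatch — a dict maps each format_suffix to its handler; chunking
-- # for the 2-per-line / 3-per-line cases is done by a recursive grouping helper.
--
-- def _chunks(lst, k):
--     if not lst:
--         return []
--     return [lst[:k]] + _chunks(lst[k:], k)
--
--
-- _HANDLERS = {
--     "List the numbers with the word 'banana' separating each number.":
--         lambda ns: " banana ".join(ns),
--     "Format with a / in between each number.":
--         lambda ns: "/".join(ns),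
--     "List 2 numbers per line.":
--         lambda ns: "\n".join(" ".join(c) for c in _chunks(ns, 2)),
--     "Return numbers wrapped in asterisks: *number*.":
--         lambda ns: " ".join("*" + n + "*" for n in ns),
--     "Format as: number1 -> number2 -> number3 -> ...":
--         lambda ns: " -> ".join(ns),
--     "List numbers with 'and' between them like: 1 and 2 and 3.":
--         lambda ns: " and ".join(ns),
--     "Return each number prefixed with '#': #1 #2 #3.":
--         lambda ns: " ".join("#" + n for n in ns),
--     "Format numbers in a single column with dashes: -number-.":
--         lambda ns: "\n".join("-" + n + "-" for n in ns),
--     "List 3 numbers per line separated by tabs.":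
--         lambda ns: "\n".join("\t".join(c) for c in _chunks(ns, 3)),
--     "Return numbers enclosed in curly braces: {number}.":
--         lambda ns: " ".join("{" + n + "}" for n in ns),
--     "Format with vertical bars: number1 | number2 | number3.":
--         lambda ns: " | ".join(ns),
--     "List numbers with 'then' between them: 1 then 2 then 3.":
--         lambda ns: " then ".join(ns),
--     "Return each number on a new line with a bullet point: \u2022 number.":
--         lambda ns: "\n".join("\u2022 " + n for n in ns),
--     "Format numbers with double colons: number1 :: number2 :: number3.":
--         lambda ns: " :: ".join(ns),
-- }
--
--
-- def format_numbers_new(numbers: list, format_suffix: str) -> str: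
--     try:
--         handler = _HANDLERS[format_suffix]
--     except KeyError:
--         raise ValueError(f"Unknown format suffix: {format_suffix}")
--     return handler([str(n) for n in numbers])
-- ===== Notes on version B (the rewrite author's own statement) =====
-- stated objective: idiomatic
-- what changed: Replaces the 14-way sequential if/elif string-comparison chain with a single hashed dictionary-dispatch table of handlers, and replaces the range/slice comprehensions of the two n-per-line cases with a recursive chunking helper.
-- outside the precondition, e.g. on format_numbers_new([1, 2], 'no such format'): A raises ValueError, B raises ValueError
import Mathlib
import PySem

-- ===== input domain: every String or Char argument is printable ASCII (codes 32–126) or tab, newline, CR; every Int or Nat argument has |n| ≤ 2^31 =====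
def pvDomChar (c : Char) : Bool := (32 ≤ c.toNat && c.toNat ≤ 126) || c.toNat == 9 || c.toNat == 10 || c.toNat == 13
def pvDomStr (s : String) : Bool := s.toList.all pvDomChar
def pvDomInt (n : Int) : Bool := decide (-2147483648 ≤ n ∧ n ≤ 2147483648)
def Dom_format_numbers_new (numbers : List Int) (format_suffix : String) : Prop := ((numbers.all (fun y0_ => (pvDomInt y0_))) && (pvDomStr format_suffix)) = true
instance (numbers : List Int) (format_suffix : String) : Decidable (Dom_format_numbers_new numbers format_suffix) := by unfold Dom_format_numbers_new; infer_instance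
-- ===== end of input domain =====

-- B replaces A's 14-way if/elif string chain by a dictionary dispatch table and a
-- recursive chunking helper for the 2-per-line / 3-per-line cases (idiomatic rewrite).

-- ===== PORT A =====
-- Literal port of A's if/elif chain; the final `else: raise ValueError(...)` returns ""
-- here and is excluded by Pre_format_numbers_new.
def format_numbers_new (numbers : List Int) (format_suffix : String) : String :=
  let ns := numbers.map PySem.Int.toStr
  if format_suffix = "List the numbers with the word 'banana' separating each number." then
    PySem.Str.join " banana " ns
  else if format_suffix = "Format with a / in between each number." then
    PySem.Str.join "/" ns
  else if format_suffix = "List 2 numbers per line." then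
    PySem.Str.join "\n" ((PySem.List.pyRange 0 (PySem.List.len ns) 2).map
      (fun i => PySem.Str.join " " (PySem.List.slice ns (some i) (some (i + 2)))))
  else if format_suffix = "Return numbers wrapped in asterisks: *number*." then
    PySem.Str.join " " (ns.map (fun n => "*" ++ n ++ "*"))
  else if format_suffix = "Format as: number1 -> number2 -> number3 -> ..." then
    PySem.Str.join " -> " ns
  else if format_suffix = "List numbers with 'and' between them like: 1 and 2 and 3." then
    PySem.Str.join " and " ns
  else if format_suffix = "Return each number prefixed with '#': #1 #2 #3." then
    PySem.Str.join " " (ns.map (fun n => "#" ++ n))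
  else if format_suffix = "Format numbers in a single column with dashes: -number-." then
    PySem.Str.join "\n" (ns.map (fun n => "-" ++ n ++ "-"))
  else if format_suffix = "List 3 numbers per line separated by tabs." then
    PySem.Str.join "\n" ((PySem.List.pyRange 0 (PySem.List.len ns) 3).map
      (fun i => PySem.Str.join "\t" (PySem.List.slice ns (some i) (some (i + 3)))))
  else if format_suffix = "Return numbers enclosed in curly braces: {number}." then
    PySem.Str.join " " (ns.map (fun n => "{" ++ n ++ "}"))
  else if format_suffix = "Format with vertical bars: number1 | number2 | number3." then
    PySem.Str.join " | " ns
  else if format_suffix = "List numbers with 'then' between them: 1 then 2 then 3." then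
    PySem.Str.join " then " ns
  else if format_suffix = "Return each number on a new line with a bullet point: • number." then
    PySem.Str.join "\n" (ns.map (fun n => "• " ++ n))
  else if format_suffix = "Format numbers with double colons: number1 :: number2 :: number3." then
    PySem.Str.join " :: " ns
  else "" -- Python: raise ValueError(f"Unknown format suffix: {format_suffix}") — outside Pre_

-- ===== PORT B =====
-- _chunks(lst, k): [lst[:k]] + _chunks(lst[k:], k).  `xs.drop (k-1)` is `(x::xs).drop k`
-- for k ≥ 1 (the only uses are k = 2 and k = 3).
def fmtChunks (k : Nat) : List String → List (List String)
  | [] => []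
  | x :: xs => (x :: xs).take k :: fmtChunks k (xs.drop (k - 1))
termination_by l => l.length
decreasing_by simp only [List.length_drop, List.length_cons]; omega

-- the Python dict _HANDLERS
def fmtHandlers : PySem.Dict String (List String → String) :=
  PySem.Dict.ofList [
    ("List the numbers with the word 'banana' separating each number.",
      fun ns => PySem.Str.join " banana " ns),
    ("Format with a / in between each number.",
      fun ns => PySem.Str.join "/" ns),
    ("List 2 numbers per line.",
      fun ns => PySem.Str.join "\n" ((fmtChunks 2 ns).map (fun c => PySem.Str.join " " c))),
    ("Return numbers wrapped in asterisks: *number*.",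
      fun ns => PySem.Str.join " " (ns.map (fun n => "*" ++ n ++ "*"))),
    ("Format as: number1 -> number2 -> number3 -> ...",
      fun ns => PySem.Str.join " -> " ns),
    ("List numbers with 'and' between them like: 1 and 2 and 3.",
      fun ns => PySem.Str.join " and " ns),
    ("Return each number prefixed with '#': #1 #2 #3.",
      fun ns => PySem.Str.join " " (ns.map (fun n => "#" ++ n))),
    ("Format numbers in a single column with dashes: -number-.",
      fun ns => PySem.Str.join "\n" (ns.map (fun n => "-" ++ n ++ "-"))),
    ("List 3 numbers per line separated by tabs.",
      fun ns => PySem.Str.join "\n" ((fmtChunks 3 ns).map (fun c => PySem.Str.join "\t" c))),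
    ("Return numbers enclosed in curly braces: {number}.",
      fun ns => PySem.Str.join " " (ns.map (fun n => "{" ++ n ++ "}"))),
    ("Format with vertical bars: number1 | number2 | number3.",
      fun ns => PySem.Str.join " | " ns),
    ("List numbers with 'then' between them: 1 then 2 then 3.",
      fun ns => PySem.Str.join " then " ns),
    ("Return each number on a new line with a bullet point: • number.",
      fun ns => PySem.Str.join "\n" (ns.map (fun n => "• " ++ n))),
    ("Format numbers with double colons: number1 :: number2 :: number3.",
      fun ns => PySem.Str.join " :: " ns)]

def format_numbers_new_alt (numbers : List Int) (format_suffix : String) : String :=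
  match fmtHandlers.get? format_suffix with
  | some h => h (numbers.map PySem.Int.toStr)
  | none => "" -- Python: raise ValueError — outside Pre_

-- ===== PRECONDITION & SPEC =====
-- Pre_ excludes exactly the unknown format suffixes, on which A raises ValueError.
def Pre_format_numbers_new (numbers : List Int) (format_suffix : String) : Prop :=
  format_suffix = "List the numbers with the word 'banana' separating each number." ∨
  format_suffix = "Format with a / in between each number." ∨
  format_suffix = "List 2 numbers per line." ∨
  format_suffix = "Return numbers wrapped in asterisks: *number*." ∨
  format_suffix = "Format as: number1 -> number2 -> number3 -> ..." ∨
  format_suffix = "List numbers with 'and' between them like: 1 and 2 and 3." ∨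
  format_suffix = "Return each number prefixed with '#': #1 #2 #3." ∨
  format_suffix = "Format numbers in a single column with dashes: -number-." ∨
  format_suffix = "List 3 numbers per line separated by tabs." ∨
  format_suffix = "Return numbers enclosed in curly braces: {number}." ∨
  format_suffix = "Format with vertical bars: number1 | number2 | number3." ∨
  format_suffix = "List numbers with 'then' between them: 1 then 2 then 3." ∨
  format_suffix = "Return each number on a new line with a bullet point: • number." ∨
  format_suffix = "Format numbers with double colons: number1 :: number2 :: number3."
instance (numbers : List Int) (format_suffix : String) : Decidable (Pre_format_numbers_new numbers format_suffix) := by unfold Pre_format_numbers_new; infer_instance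
def pvWitness_format_numbers_new : List Int × String := ([1, -2, 3], "List 2 numbers per line.")
def Spec_format_numbers_new (numbers : List Int) (format_suffix : String) (out : String) : Prop := out = format_numbers_new_alt numbers format_suffix
instance (numbers : List Int) (format_suffix : String) (out : String) : Decidable (Spec_format_numbers_new numbers format_suffix out) := by unfold Spec_format_numbers_new; infer_instance

-- ===== CLAIM (what is proved, stated in full; the proofs are below) =====
def Claim_equal_format_numbers_new : Prop := ∀ (numbers : List Int) (format_suffix : String), Dom_format_numbers_new numbers format_suffix → Pre_format_numbers_new numbers format_suffix → Spec_format_numbers_new numbers format_suffix (format_numbers_new numbers format_suffix)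

-- ===== LEMMAS AND PROOFS =====

-- the chunk lists, in the Nat form produced by pyRange_of_pos
theorem chunksEq (k : Nat) (hk : 0 < k) :
    ∀ (l : List String),
      (List.range (if 0 < l.length then (l.length + k - 1) / k else 0)).map
        (fun j => (l.drop (k * j)).take k) = fmtChunks k l
  | [] => by rw [fmtChunks]; simp
  | x :: xs => by
    have hcount : (if 0 < (x :: xs).length then ((x :: xs).length + k - 1) / k else 0)
        = (if 0 < (xs.drop (k - 1)).length then ((xs.drop (k - 1)).length + k - 1) / k else 0) + 1 := by
      rw [if_pos (by simp)]
      simp only [List.length_cons, List.length_drop]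
      have h1 : xs.length + 1 + k - 1 = xs.length + k := by omega
      rw [h1, Nat.add_div_right _ hk]
      congr 1
      by_cases hle : xs.length + 1 ≤ k
      · rw [if_neg (by omega)]
        exact Nat.div_eq_of_lt (by omega)
      · rw [if_pos (by omega)]
        congr 1
        omega
    rw [hcount, List.range_succ_eq_map, List.map_cons, List.map_map]
    have hbody : ((fun j => ((x :: xs).drop (k * j)).take k) ∘ Nat.succ)
        = (fun j => ((xs.drop (k - 1)).drop (k * j)).take k) := by
      funext j
      simp only [Function.comp]
      congr 1
      rw [List.drop_drop]
      have hm : k * Nat.succ j = (k * j + (k - 1)) + 1 := by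
        rw [Nat.mul_succ]; omega
      rw [hm, List.drop_succ_cons]
      congr 1
      omega
    rw [hbody, chunksEq k hk (xs.drop (k - 1))]
    conv_rhs => rw [fmtChunks]
    simp
termination_by l => l.length
decreasing_by simp only [List.length_drop, List.length_cons]; omega

-- A's range/slice comprehension equals B's recursive chunking
theorem pyRangeSliceEq (k : Nat) (hk : 0 < k) (l : List String) :
    (PySem.List.pyRange 0 (PySem.List.len l) (k : Int)).map
      (fun i => PySem.List.slice l (some i) (some (i + (k : Int)))) = fmtChunks k l := by
  rw [PySem.List.len_eq, PySem.List.pyRange_of_pos _ _ (by exact_mod_cast hk), List.map_map]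
  have hc : (if (0 : Int) < (l.length : Int) then (((l.length : Int) - 0 + k - 1) / k).toNat else 0)
      = (if 0 < l.length then (l.length + k - 1) / k else 0) := by
    by_cases h : 0 < l.length
    · rw [if_pos (by exact_mod_cast h), if_pos h]
      have hcast : ((l.length : Int) - 0 + k - 1) = ((l.length + k - 1 : Nat) : Int) := by
        omega
      rw [hcast, ← Int.natCast_div, Int.toNat_natCast]
    · rw [if_neg (by simpa using h), if_neg h]
  rw [hc, ← chunksEq k hk l]
  apply List.map_congr_left
  intro j _
  simp only [Function.comp, zero_add]
  have hmul : ((k : Int) * (j : Int)) = ((k * j : Nat) : Int) := by push_cast; ring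
  rw [hmul, PySem.List.slice_natCast_add]

theorem case_two (numbers : List Int) :
    format_numbers_new numbers "List 2 numbers per line."
      = format_numbers_new_alt numbers "List 2 numbers per line." := by
  have h := pyRangeSliceEq 2 (by omega) (numbers.map PySem.Int.toStr)
  simp only [Nat.cast_ofNat] at h
  show PySem.Str.join "\n" ((PySem.List.pyRange 0 (PySem.List.len (numbers.map PySem.Int.toStr)) 2).map
      (fun i => PySem.Str.join " " (PySem.List.slice (numbers.map PySem.Int.toStr) (some i) (some (i + 2)))))
    = PySem.Str.join "\n" ((fmtChunks 2 (numbers.map PySem.Int.toStr)).map (fun c => PySem.Str.join " " c))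
  rw [← h, List.map_map]
  rfl

theorem case_three (numbers : List Int) :
    format_numbers_new numbers "List 3 numbers per line separated by tabs."
      = format_numbers_new_alt numbers "List 3 numbers per line separated by tabs." := by
  have h := pyRangeSliceEq 3 (by omega) (numbers.map PySem.Int.toStr)
  simp only [Nat.cast_ofNat] at h
  show PySem.Str.join "\n" ((PySem.List.pyRange 0 (PySem.List.len (numbers.map PySem.Int.toStr)) 3).map
      (fun i => PySem.Str.join "\t" (PySem.List.slice (numbers.map PySem.Int.toStr) (some i) (some (i + 3)))))
    = PySem.Str.join "\n" ((fmtChunks 3 (numbers.map PySem.Int.toStr)).map (fun c => PySem.Str.join "\t" c))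
  rw [← h, List.map_map]
  rfl

-- ===== VERDICT (by name: the statement is the Claim_ definition above) =====
theorem format_numbers_new_spec : Claim_equal_format_numbers_new := by
  intro numbers format_suffix _ hpre
  unfold Spec_format_numbers_new
  unfold Pre_format_numbers_new at hpre
  rcases hpre with h|h|h|h|h|h|h|h|h|h|h|h|h|h <;> subst h
  · rfl
  · rfl
  · exact case_two numbers
  · rfl
  · rfl
  · rfl
  · rfl
  · rfl
  · exact case_three numbers
  · rfl
  · rfl
  · rfl
  · rfl
  · rfl
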